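-- pv_equiv track=rewrite | github.com/kimjune01/june.kim | worklog/h14_forward_incremental.py | count_reachable_pairs
-- ===== SOURCE A (Python) =====
-- from collections import defaultdict
-- import heapq
--
-- def build_adj(k, edges):
--     adj = defaultdict(list)
--     for (a, b, t) in edges:
--         adj[a].append((b, t))
--         adj[b].append((a, t))
--     return adj
--
-- def temporal_reachable_from(source, adj):
--     best = {source: -1}  # source reachable at time -1 (before all edges)
--     queue = [(-1, source)]
--     while queue:
--         t_arr, u = heapq.heappop(queue)
--         if t_arr > best.get(u, float('inf')):
--             continue
--         for (v, t_edge) in adj[u]: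
--             if t_edge >= t_arr:
--                 if t_edge < best.get(v, float('inf')):
--                     best[v] = t_edge
--                     heapq.heappush(queue, (t_edge, v))
--     return best
--
-- def count_reachable_pairs(k, edges):
--     """Count number of reachable pairs (u,v) with u!=v."""
--     adj = build_adj(k, edges)
--     n = 2 * k
--     total = 0
--     for s in range(n):
--         r = temporal_reachable_from(s, adj)
--         total += len(r) - 1  # exclude self
--     return total
-- ===== SOURCE B (Python) =====
-- def count_reachable_pairs(k, edges):
--     """Count number of reachable pairs (u,v) with u!=v."""
--     n = 2 * k
--     # directed temporal darts (both directions of each undirected edge), sorted by time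
--     darts = []
--     for (a, b, t) in edges:
--         darts.append((a, b, t))
--         darts.append((b, a, t))
--     darts.sort(key=lambda d: d[2])
--     total = 0
--     for s in range(n):
--         # Bellman-Ford style round-based relaxation to a fixpoint:
--         # best[v] = some arrival time of a time-nondecreasing path s -> v
--         best = {s: -1}
--         changed = True
--         while changed:
--             changed = False
--             for (u, v, t) in darts:
--                 bu = best.get(u)
--                 if bu is not None and bu <= t:
--                     bv = best.get(v)
--                     if bv is None or t < bv:
--                         best[v] = t
--                         changed = True
--         total += len(best) - 1
--     return total
-- ===== Notes on version B (the rewrite author's own statement) =====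
-- stated objective: alternative
-- what changed: A runs a per-source heap-driven (Dijkstra-style) temporal search over an adjacency dict; B drops the priority queue and adjacency dict entirely and instead relaxes the flat time-sorted list of directed darts in repeated rounds to a fixpoint (Bellman-Ford style), per source.
import Mathlib
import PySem

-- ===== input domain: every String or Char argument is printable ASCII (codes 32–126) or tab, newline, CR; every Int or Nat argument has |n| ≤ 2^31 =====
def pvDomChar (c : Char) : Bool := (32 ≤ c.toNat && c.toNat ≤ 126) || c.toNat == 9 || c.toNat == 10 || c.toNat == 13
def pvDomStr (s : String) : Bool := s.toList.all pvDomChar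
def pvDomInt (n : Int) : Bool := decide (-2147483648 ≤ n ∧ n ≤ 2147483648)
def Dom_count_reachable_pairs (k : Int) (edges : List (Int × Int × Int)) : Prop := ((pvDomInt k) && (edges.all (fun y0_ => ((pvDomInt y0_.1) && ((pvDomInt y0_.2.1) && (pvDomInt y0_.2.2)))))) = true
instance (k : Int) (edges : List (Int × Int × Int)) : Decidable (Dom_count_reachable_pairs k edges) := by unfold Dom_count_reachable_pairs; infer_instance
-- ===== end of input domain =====

-- B changes the algorithm: instead of a per-source heap-driven (Dijkstra-style) temporal search,
-- it relaxes the time-sorted list of directed darts in repeated rounds to a fixpoint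
-- (Bellman-Ford style); objective: alternative.

-- ===== PORT A =====

-- Termination machinery for the worklist loop (cited by `decreasing_by`): the potential of `best`
-- counts, for each node mentioned in the adjacency structure, how many further strict decreases its
-- entry can undergo; every push strictly decreases it.
def pvCap (times : List Int) (b : Option Int) : Nat :=
  match b with
  | none => times.length + 1
  | some x => times.countP (fun t => decide (t < x))

def pvPotL (nodes : List Int) (times : List Int) (best : PySem.Dict Int Int) : Nat :=
  ((PySem.Set.ofList nodes).map (fun v => pvCap times (best.get? v))).sum

def pvAllPairs (adj : PySem.Dict Int (List (Int × Int))) : List (Int × Int) :=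
  adj.items.flatMap (fun p => p.2)

def pvPot (adj : PySem.Dict Int (List (Int × Int))) (best : PySem.Dict Int Int) : Nat :=
  pvPotL ((pvAllPairs adj).map (·.1)) ((pvAllPairs adj).map (·.2)) best

-- one relaxation of a single neighbour, exactly A's inner-loop body
-- (t_edge >= t_arr; t_edge < best.get(v, float('inf')) → update best and push)
def pvRelaxStep (tArr : Int) (st : PySem.Dict Int Int × List (Int × Int)) (e : Int × Int) :
    PySem.Dict Int Int × List (Int × Int) :=
  if tArr ≤ e.2 then
    if (match st.1.get? e.1 with | some bv => decide (e.2 < bv) | none => true) then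
      (st.1.insert e.1 e.2, st.2 ++ [(e.2, e.1)])
    else st
  else st

-- heapq modeled by its contract: the queue is the multiset of pushed pairs; heappush appends,
-- heappop returns the lexicographically least pair (the value heappop returns; the heap's internal
-- array order is not observable through A's code).
def pvPairLt (p q : Int × Int) : Bool := p.1 < q.1 || (p.1 == q.1 && p.2 < q.2)

def pvRemoveFirst : List (Int × Int) → (Int × Int) → List (Int × Int)
  | [], _ => []
  | x :: xs, m => if x = m then xs else x :: pvRemoveFirst xs m

def pvHeapPop : List (Int × Int) → Option ((Int × Int) × List (Int × Int))
  | [] => none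
  | x :: xs =>
      let m := xs.foldl (fun a b => if pvPairLt b a then b else a) x
      some (m, pvRemoveFirst (x :: xs) m)

theorem pvFoldlMin_mem (xs : List (Int × Int)) : ∀ a : Int × Int,
    xs.foldl (fun a b => if pvPairLt b a then b else a) a = a ∨
    xs.foldl (fun a b => if pvPairLt b a then b else a) a ∈ xs := by
  induction xs with
  | nil => intro a; exact Or.inl rfl
  | cons x xs ih =>
    intro a
    simp only [List.foldl_cons]
    by_cases h : pvPairLt x a = true
    · rw [if_pos h]
      rcases ih x with h' | h'
      · right; rw [h']; exact List.mem_cons_self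
      · right; exact List.mem_cons_of_mem _ h'
    · rw [if_neg h]
      rcases ih a with h' | h'
      · exact Or.inl h'
      · right; exact List.mem_cons_of_mem _ h'

theorem pvRemoveFirst_length_of_mem {xs : List (Int × Int)} {m : Int × Int} (h : m ∈ xs) :
    (pvRemoveFirst xs m).length + 1 = xs.length := by
  induction xs with
  | nil => cases h
  | cons x xs ih =>
    by_cases hx : x = m
    · simp [pvRemoveFirst, hx]
    · rcases List.mem_cons.1 h with h' | h'
      · exact absurd h'.symm hx
      · simp [pvRemoveFirst, hx, ih h']

theorem pvHeapPop_some {q : List (Int × Int)} {m : Int × Int} {rest : List (Int × Int)}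
    (h : pvHeapPop q = some (m, rest)) : m ∈ q ∧ rest.length + 1 = q.length := by
  cases q with
  | nil => simp [pvHeapPop] at h
  | cons x xs =>
    simp only [pvHeapPop, Option.some.injEq, Prod.mk.injEq] at h
    obtain ⟨hm, hr⟩ := h
    subst hm
    have hmem : xs.foldl (fun a b => if pvPairLt b a then b else a) x ∈ x :: xs := by
      rcases pvFoldlMin_mem xs x with h' | h'
      · rw [h']; exact List.mem_cons_self
      · exact List.mem_cons_of_mem _ h'
    subst hr
    exact ⟨hmem, pvRemoveFirst_length_of_mem hmem⟩

theorem pvSum_le_sum {l : List Int} {f g : Int → Nat} (h : ∀ x ∈ l, f x ≤ g x) :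
    (l.map f).sum ≤ (l.map g).sum := by
  induction l with
  | nil => simp
  | cons y ys ih =>
    simp only [List.map_cons, List.sum_cons]
    have h1 := h y List.mem_cons_self
    have h2 := ih (fun x hx => h x (List.mem_cons_of_mem _ hx))
    omega

theorem pvSum_lt_sum {l : List Int} {f g : Int → Nat} (h : ∀ x ∈ l, f x ≤ g x)
    (x0 : Int) (hx0 : x0 ∈ l) (hlt : f x0 < g x0) : (l.map f).sum < (l.map g).sum := by
  induction l with
  | nil => cases hx0
  | cons y ys ih =>
    simp only [List.map_cons, List.sum_cons]
    rcases List.mem_cons.1 hx0 with rfl | hx0'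
    · have := pvSum_le_sum (l := ys) (f := f) (g := g)
        (fun x hx => h x (List.mem_cons_of_mem _ hx))
      omega
    · have h1 : f y ≤ g y := h y List.mem_cons_self
      have h2 := ih (fun x hx => h x (List.mem_cons_of_mem _ hx)) hx0'
      omega

theorem pvCountP_lt {l : List Int} {p q : Int → Bool} {x : Int} (hx : x ∈ l)
    (hpx : p x = false) (hqx : q x = true) (h : ∀ a, p a = true → q a = true) :
    l.countP p < l.countP q := by
  induction l with
  | nil => cases hx
  | cons y ys ih =>
    rcases List.mem_cons.1 hx with rfl | hx'
    · have h1 : ys.countP p ≤ ys.countP q := List.countP_mono_left (fun a _ => h a)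
      simp [hpx, hqx]
      omega
    · have h2 := ih hx'
      by_cases hp : p y = true
      · simp [hp, h y hp]
        omega
      · simp only [List.countP_cons]
        have hq := List.countP_mono_left (l := [y]) (fun a _ => h a)
        by_cases hqy : q y = true <;> simp [hp, hqy] <;> omega

theorem pvCap_lt {times : List Int} {b : Option Int} {t : Int}
    (hb : b = none ∨ ∃ x, b = some x ∧ t < x) (ht : b ≠ none → t ∈ times) :
    pvCap times (some t) < pvCap times b := by
  rcases hb with rfl | ⟨x, rfl, hlt⟩
  · have := List.countP_le_length (l := times) (p := fun u => decide (u < t))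
    simp [pvCap]; omega
  · have htm : t ∈ times := ht (by simp)
    exact pvCountP_lt htm (by simp) (by simp [hlt]) (fun a ha => by
      simp only [decide_eq_true_eq] at *; omega)

theorem pvPotL_insert_lt {nodes times : List Int} {best : PySem.Dict Int Int} {v t : Int}
    (hv : v ∈ nodes)
    (hb : best.get? v = none ∨ ∃ x, best.get? v = some x ∧ t < x)
    (ht : best.get? v ≠ none → t ∈ times) :
    pvPotL nodes times (best.insert v t) < pvPotL nodes times best := by
  unfold pvPotL
  apply pvSum_lt_sum (x0 := v)
  · intro w _
    rw [PySem.Dict.get?_insert]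
    by_cases hw : w = v
    · subst hw
      simp only [if_pos rfl]
      exact Nat.le_of_lt (pvCap_lt hb ht)
    · simp [hw]
  · simpa [PySem.Set.mem_ofList] using hv
  · rw [PySem.Dict.get?_insert, if_pos rfl]
    exact pvCap_lt hb ht

theorem pvRelax_measure (nodes times : List Int) (tArr : Int) :
    ∀ (nbrs : List (Int × Int)) (st : PySem.Dict Int Int × List (Int × Int)),
    (∀ p ∈ nbrs, p.1 ∈ nodes ∧ p.2 ∈ times) →
    (nbrs.foldl (pvRelaxStep tArr) st).2.length + pvPotL nodes times (nbrs.foldl (pvRelaxStep tArr) st).1 ≤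
      st.2.length + pvPotL nodes times st.1 := by
  intro nbrs
  induction nbrs with
  | nil => intro st _; simp
  | cons p ps ih =>
    intro st hmem
    simp only [List.foldl_cons]
    have hrest : ∀ q ∈ ps, q.1 ∈ nodes ∧ q.2 ∈ times :=
      fun q hq => hmem q (List.mem_cons_of_mem _ hq)
    have hstep : (pvRelaxStep tArr st p).2.length + pvPotL nodes times (pvRelaxStep tArr st p).1 ≤
        st.2.length + pvPotL nodes times st.1 := by
      unfold pvRelaxStep
      by_cases h1 : tArr ≤ p.2
      · rw [if_pos h1]
        cases hbv : st.1.get? p.1 with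
        | none =>
          have hlt := pvPotL_insert_lt (nodes := nodes) (times := times) (best := st.1)
            (t := p.2) (hmem p List.mem_cons_self).1 (Or.inl hbv) (by simp [hbv])
          simp only [if_true, List.length_append, List.length_cons, List.length_nil]
          omega
        | some bv =>
          by_cases h2 : p.2 < bv
          · have hlt := pvPotL_insert_lt (nodes := nodes) (times := times) (best := st.1)
              (hmem p List.mem_cons_self).1 (Or.inr ⟨bv, hbv, h2⟩)
              (fun _ => (hmem p List.mem_cons_self).2)
            simp only [h2, decide_true, if_true, List.length_append,
              List.length_cons, List.length_nil]
            omega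
          · simp [h2]
      · rw [if_neg h1]
    calc _ ≤ (pvRelaxStep tArr st p).2.length + pvPotL nodes times (pvRelaxStep tArr st p).1 :=
            ih _ hrest
      _ ≤ _ := hstep

theorem pvAllPairs_mem {adj : PySem.Dict Int (List (Int × Int))} {u : Int} {p : Int × Int}
    (h : p ∈ adj.getD u []) : p.1 ∈ (pvAllPairs adj).map (·.1) ∧ p.2 ∈ (pvAllPairs adj).map (·.2) := by
  have : p ∈ pvAllPairs adj := by
    cases hg : adj.get? u with
    | none => rw [PySem.Dict.getD_eq_get?_getD, hg] at h; simp at h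
    | some l =>
      rw [PySem.Dict.getD_eq_get?_getD, hg] at h
      simp only [Option.getD_some] at h
      exact List.mem_flatMap.2 ⟨(u, l), PySem.Dict.mem_items_of_get?_eq_some _ hg, h⟩
  exact ⟨List.mem_map_of_mem this, List.mem_map_of_mem this⟩

-- the worklist loop of temporal_reachable_from (while queue: pop; stale-skip; relax neighbours)
def pvLoopA (adj : PySem.Dict Int (List (Int × Int))) (best : PySem.Dict Int Int)
    (q : List (Int × Int)) : PySem.Dict Int Int :=
  match hq : pvHeapPop q with
  | none => best
  | some (tu, rest) =>
      if (match best.get? tu.2 with | some b => decide (b < tu.1) | none => false) then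
        pvLoopA adj best rest
      else
        pvLoopA adj ((adj.getD tu.2 []).foldl (pvRelaxStep tu.1) (best, rest)).1
          ((adj.getD tu.2 []).foldl (pvRelaxStep tu.1) (best, rest)).2
termination_by q.length + pvPot adj best
decreasing_by
  · have := (pvHeapPop_some hq).2
    omega
  · have h1 := (pvHeapPop_some hq).2
    have h2 := pvRelax_measure ((pvAllPairs adj).map (·.1)) ((pvAllPairs adj).map (·.2)) tu.1
      (adj.getD tu.2 []) (best, rest) (fun p hp => pvAllPairs_mem hp)
    simp only [pvPot]
    simp only at h2
    omega

def pvBuildAdj (k : Int) (edges : List (Int × Int × Int)) : PySem.Dict Int (List (Int × Int)) :=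
  edges.foldl (fun adj e =>
    let adj1 := adj.insert e.1 (adj.getD e.1 [] ++ [(e.2.1, e.2.2)])
    adj1.insert e.2.1 (adj1.getD e.2.1 [] ++ [(e.1, e.2.2)])) PySem.Dict.empty

def count_reachable_pairs (k : Int) (edges : List (Int × Int × Int)) : Int :=
  let adj := pvBuildAdj k edges
  let n := 2 * k
  (PySem.List.pyRange 0 n 1).foldl (fun total s =>
    let r := pvLoopA adj ((PySem.Dict.empty).insert s (-1)) [(-1, s)]
    total + (r.size : Int) - 1) 0

-- ===== PORT B =====

-- one relaxation of a single directed dart, exactly B's inner-loop body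
def pvPassStep (st : PySem.Dict Int Int × Bool) (d : Int × Int × Int) :
    PySem.Dict Int Int × Bool :=
  match st.1.get? d.1 with
  | none => st
  | some bu =>
    if bu ≤ d.2.2 then
      match st.1.get? d.2.1 with
      | some bv => if d.2.2 < bv then (st.1.insert d.2.1 d.2.2, true) else st
      | none => (st.1.insert d.2.1 d.2.2, true)
    else st

theorem pvPass_measure (nodes times : List Int) :
    ∀ (l : List (Int × Int × Int)) (st : PySem.Dict Int Int × Bool),
    (∀ d ∈ l, d.2.1 ∈ nodes ∧ d.2.2 ∈ times) →
    pvPotL nodes times (l.foldl pvPassStep st).1 ≤ pvPotL nodes times st.1 := by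
  intro l
  induction l with
  | nil => intro st _; simp
  | cons d ds ih =>
    intro st hmem
    simp only [List.foldl_cons]
    have hstep : pvPotL nodes times (pvPassStep st d).1 ≤ pvPotL nodes times st.1 := by
      unfold pvPassStep
      cases hgu : st.1.get? d.1 with
      | none => simp
      | some bu =>
        by_cases h1 : bu ≤ d.2.2
        · cases hgv : st.1.get? d.2.1 with
          | none =>
            simp only [hgu, hgv, if_pos h1]
            exact Nat.le_of_lt (pvPotL_insert_lt (t := d.2.2) (hmem d List.mem_cons_self).1
              (Or.inl hgv) (by simp [hgv]))
          | some bv =>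
            by_cases h2 : d.2.2 < bv
            · simp only [hgu, hgv, if_pos h1, h2, if_true, decide_true, decide_eq_true_eq, iff_true]
              exact Nat.le_of_lt (pvPotL_insert_lt (hmem d List.mem_cons_self).1
                (Or.inr ⟨bv, hgv, h2⟩) (fun _ => (hmem d List.mem_cons_self).2))
            · simp [hgu, hgv, h1, h2]
        · simp [hgu, h1]
    exact le_trans (ih _ (fun e he => hmem e (List.mem_cons_of_mem _ he))) hstep

theorem pvPass_true_lt (nodes times : List Int) :
    ∀ (l : List (Int × Int × Int)) (best : PySem.Dict Int Int),
    (∀ d ∈ l, d.2.1 ∈ nodes ∧ d.2.2 ∈ times) →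
    (l.foldl pvPassStep (best, false)).2 = true →
    pvPotL nodes times (l.foldl pvPassStep (best, false)).1 < pvPotL nodes times best := by
  intro l
  induction l with
  | nil => intro best _ h; simp at h
  | cons d ds ih =>
    intro best hmem hflag
    simp only [List.foldl_cons] at hflag ⊢
    by_cases hch : pvPassStep (best, false) d = (best, false)
    · rw [hch] at hflag ⊢
      exact ih best (fun e he => hmem e (List.mem_cons_of_mem _ he)) hflag
    · -- the step changed the state: it must be an insert with flag true
      have hstep : ∃ v t, (best.get? v = none ∨ ∃ x, best.get? v = some x ∧ t < x) ∧
          v ∈ nodes ∧ (best.get? v ≠ none → t ∈ times) ∧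
          pvPassStep (best, false) d = (best.insert v t, true) := by
        cases hgu : best.get? d.1 with
        | none => exact absurd (by simp [pvPassStep, hgu]) hch
        | some bu =>
          by_cases h1 : bu ≤ d.2.2
          · cases hgv : best.get? d.2.1 with
            | none =>
              exact ⟨d.2.1, d.2.2, Or.inl hgv, (hmem d List.mem_cons_self).1,
                (by simp [hgv]), by simp [pvPassStep, hgu, hgv, h1]⟩
            | some bv =>
              by_cases h2 : d.2.2 < bv
              · exact ⟨d.2.1, d.2.2, Or.inr ⟨bv, hgv, h2⟩, (hmem d List.mem_cons_self).1,
                  (fun _ => (hmem d List.mem_cons_self).2), by simp [pvPassStep, hgu, hgv, h1, h2]⟩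
              · exact absurd (by simp [pvPassStep, hgu, hgv, h1, h2]) hch
          · exact absurd (by simp [pvPassStep, hgu, h1]) hch
      obtain ⟨v, t, hb, hv, ht, heq⟩ := hstep
      rw [heq]
      calc pvPotL nodes times (ds.foldl pvPassStep (best.insert v t, true)).1
          ≤ pvPotL nodes times (best.insert v t) :=
            pvPass_measure nodes times ds _ (fun e he => hmem e (List.mem_cons_of_mem _ he))
        _ < pvPotL nodes times best := pvPotL_insert_lt hv hb ht

-- the while-changed loop of B: one pass over all darts, repeat while the pass changed something
def pvLoopB (darts : List (Int × Int × Int)) (best : PySem.Dict Int Int) : PySem.Dict Int Int :=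
  if h : (darts.foldl pvPassStep (best, false)).2 = true then
    pvLoopB darts (darts.foldl pvPassStep (best, false)).1
  else
    (darts.foldl pvPassStep (best, false)).1
termination_by pvPotL (darts.map (·.2.1)) (darts.map (·.2.2)) best
decreasing_by
  simp only [List.foldl_attach] at h ⊢
  exact pvPass_true_lt (darts.map (·.2.1)) (darts.map (·.2.2)) darts best
    (fun d hd => ⟨List.mem_map_of_mem hd, List.mem_map_of_mem hd⟩) h

def pvDarts (edges : List (Int × Int × Int)) : List (Int × Int × Int) :=
  edges.foldl (fun d e => (d ++ [(e.1, e.2.1, e.2.2)]) ++ [(e.2.1, e.1, e.2.2)]) []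

def count_reachable_pairs_alt (k : Int) (edges : List (Int × Int × Int)) : Int :=
  let darts := PySem.List.sorted (pvDarts edges) (fun d => d.2.2) false
  let n := 2 * k
  (PySem.List.pyRange 0 n 1).foldl (fun total s =>
    let r := pvLoopB darts ((PySem.Dict.empty).insert s (-1))
    total + (r.size : Int) - 1) 0

-- ===== PRECONDITION & SPEC =====
def Spec_count_reachable_pairs (k : Int) (edges : List (Int × Int × Int)) (out : Int) : Prop := out = count_reachable_pairs_alt k edges
instance (k : Int) (edges : List (Int × Int × Int)) (out : Int) : Decidable (Spec_count_reachable_pairs k edges out) := by unfold Spec_count_reachable_pairs; infer_instance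

-- ===== CLAIM (what is proved, stated in full; the proofs are below) =====
def Claim_equal_count_reachable_pairs : Prop := ∀ (k : Int) (edges : List (Int × Int × Int)), Dom_count_reachable_pairs k edges → Spec_count_reachable_pairs k edges (count_reachable_pairs k edges)

-- ===== LEMMAS AND PROOFS =====

-- Temporal reachability: pvReach D s v a holds when there is a path s → v along darts of D whose
-- edge times are non-decreasing, arriving at time a (the source arrives at -1, before all edges).
inductive pvReach (D : List (Int × Int × Int)) (s : Int) : Int → Int → Prop
  | refl : pvReach D s s (-1)
  | step {u a v t} : pvReach D s u a → (u, v, t) ∈ D → a ≤ t → pvReach D s v t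

def pvClosedAt (D : List (Int × Int × Int)) (best : PySem.Dict Int Int) (w b : Int) : Prop :=
  ∀ v t, (w, v, t) ∈ D → b ≤ t → ∃ c, best.get? v = some c ∧ c ≤ t

def pvClosed (D : List (Int × Int × Int)) (best : PySem.Dict Int Int) : Prop :=
  ∀ u v t bu, (u, v, t) ∈ D → best.get? u = some bu → bu ≤ t →
    ∃ bv, best.get? v = some bv ∧ bv ≤ t

def pvSound (D : List (Int × Int × Int)) (s : Int) (best : PySem.Dict Int Int) : Prop :=
  ∀ v b, best.get? v = some b → pvReach D s v b

def pvSrc (s : Int) (best : PySem.Dict Int Int) : Prop :=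
  ∃ b, best.get? s = some b ∧ b ≤ -1

-- both loops produce a `best` dict that is sound, closed, contains the source, with unique keys
def pvGood (D : List (Int × Int × Int)) (s : Int) (best : PySem.Dict Int Int) : Prop :=
  pvSound D s best ∧ pvClosed D best ∧ pvSrc s best ∧ best.keys.Nodup

theorem pvGood_complete {D : List (Int × Int × Int)} {s : Int} {best : PySem.Dict Int Int}
    (h : pvGood D s best) : ∀ v a, pvReach D s v a → ∃ c, best.get? v = some c ∧ c ≤ a := by
  intro v a hr
  induction hr with
  | refl => exact h.2.2.1
  | step hr he hle ih =>
    obtain ⟨c, hc, hca⟩ := ih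
    obtain ⟨bv, hbv, hbt⟩ := h.2.1 _ _ _ _ he hc (le_trans hca hle)
    exact ⟨bv, hbv, hbt⟩

theorem pvGood_mem_keys {D : List (Int × Int × Int)} {s : Int} {best : PySem.Dict Int Int}
    (h : pvGood D s best) (v : Int) : v ∈ best.keys ↔ ∃ a, pvReach D s v a := by
  constructor
  · intro hv
    cases hg : best.get? v with
    | none =>
      rw [PySem.Dict.get?_eq_none_iff_not_mem_keys] at hg
      exact absurd hv hg
    | some b => exact ⟨b, h.1 v b hg⟩
  · rintro ⟨a, hr⟩
    obtain ⟨c, hc, _⟩ := pvGood_complete h v a hr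
    by_contra hv
    rw [← PySem.Dict.get?_eq_none_iff_not_mem_keys] at hv
    rw [hv] at hc
    cases hc

theorem pvGood_size_eq {D : List (Int × Int × Int)} {s : Int} {b1 b2 : PySem.Dict Int Int}
    (h1 : pvGood D s b1) (h2 : pvGood D s b2) : b1.size = b2.size := by
  have hperm : b1.keys.Perm b2.keys := by
    rw [List.perm_ext_iff_of_nodup h1.2.2.2 h2.2.2.2]
    intro v
    rw [pvGood_mem_keys h1 v, pvGood_mem_keys h2 v]
  have h1' : b1.size = b1.keys.length := by
    simp [PySem.Dict.size, PySem.Dict.keys]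
  have h2' : b2.size = b2.keys.length := by
    simp [PySem.Dict.size, PySem.Dict.keys]
  rw [h1', h2', hperm.length_eq]

-- ---- A side: invariants of the worklist loop ----

def pvIQ (best : PySem.Dict Int Int) (q : List (Int × Int)) : Prop :=
  ∀ p ∈ q, ∃ b, best.get? p.2 = some b ∧ b ≤ p.1

def pvIC (D : List (Int × Int × Int)) (best : PySem.Dict Int Int) (q : List (Int × Int)) : Prop :=
  ∀ w b, best.get? w = some b → ((b, w) ∈ q ∨ pvClosedAt D best w b)

def pvICx (D : List (Int × Int × Int)) (best : PySem.Dict Int Int) (q : List (Int × Int))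
    (u0 tArr : Int) : Prop :=
  ∀ w b, best.get? w = some b → ((b, w) ∈ q ∨ pvClosedAt D best w b ∨ (w = u0 ∧ b = tArr))

def pvSat (best : PySem.Dict Int Int) (tArr : Int) (l : List (Int × Int)) : Prop :=
  ∀ p ∈ l, tArr ≤ p.2 → ∃ c, best.get? p.1 = some c ∧ c ≤ p.2

def pvLe (b1 b2 : PySem.Dict Int Int) : Prop :=
  ∀ w b, b2.get? w = some b → ∃ b', b1.get? w = some b' ∧ b' ≤ b

def pvInvA (D : List (Int × Int × Int)) (s : Int) (best : PySem.Dict Int Int)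
    (q : List (Int × Int)) : Prop :=
  pvSound D s best ∧ pvIQ best q ∧ pvSrc s best ∧ best.keys.Nodup ∧ pvIC D best q

theorem pvRemoveFirst_subset {xs : List (Int × Int)} {m y : Int × Int}
    (h : y ∈ pvRemoveFirst xs m) : y ∈ xs := by
  induction xs with
  | nil => simpa [pvRemoveFirst] using h
  | cons x xs ih =>
    by_cases hx : x = m
    · simp only [pvRemoveFirst, if_pos hx] at h
      exact List.mem_cons_of_mem _ h
    · simp only [pvRemoveFirst, if_neg hx, List.mem_cons] at h
      rcases h with rfl | h
      · exact List.mem_cons_self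
      · exact List.mem_cons_of_mem _ (ih h)

theorem mem_pvRemoveFirst_of_ne {xs : List (Int × Int)} {m y : Int × Int}
    (hy : y ∈ xs) (hne : y ≠ m) : y ∈ pvRemoveFirst xs m := by
  induction xs with
  | nil => cases hy
  | cons x xs ih =>
    by_cases hx : x = m
    · simp only [pvRemoveFirst, if_pos hx]
      rcases List.mem_cons.1 hy with rfl | h
      · exact absurd hx hne
      · exact h
    · simp only [pvRemoveFirst, if_neg hx, List.mem_cons]
      rcases List.mem_cons.1 hy with rfl | h
      · exact Or.inl rfl
      · exact Or.inr (ih h)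

theorem pvHeapPop_rest {q : List (Int × Int)} {m : Int × Int} {rest : List (Int × Int)}
    (h : pvHeapPop q = some (m, rest)) : rest = pvRemoveFirst q m := by
  cases q with
  | nil => simp [pvHeapPop] at h
  | cons x xs =>
    simp only [pvHeapPop, Option.some.injEq, Prod.mk.injEq] at h
    obtain ⟨hm, hr⟩ := h
    rw [← hr, hm]

-- one decreasing update during A's relaxation sweep preserves all queue invariants
theorem pvAUpdate (D : List (Int × Int × Int)) (s u0 tArr : Int) (hu : pvReach D s u0 tArr)
    {best : PySem.Dict Int Int} {q : List (Int × Int)} {v t : Int}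
    (he : (u0, v, t) ∈ D) (hta : tArr ≤ t)
    (hdec : best.get? v = none ∨ ∃ bv, best.get? v = some bv ∧ t < bv)
    (h1 : pvSound D s best) (h2 : pvIQ best q) (h3 : pvSrc s best)
    (h4 : best.keys.Nodup) (h5 : pvICx D best q u0 tArr) :
    pvSound D s (best.insert v t) ∧ pvIQ (best.insert v t) (q ++ [(t, v)]) ∧
    pvSrc s (best.insert v t) ∧ (best.insert v t).keys.Nodup ∧
    pvICx D (best.insert v t) (q ++ [(t, v)]) u0 tArr := by
  have hget : ∀ w, (best.insert v t).get? w = if w = v then some t else best.get? w :=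
    fun w => PySem.Dict.get?_insert best v w t
  refine ⟨?_, ?_, ?_, PySem.Dict.nodup_keys_insert _ _ _ h4, ?_⟩
  · -- soundness
    intro w b hw
    rw [hget] at hw
    by_cases hwv : w = v
    · rw [if_pos hwv] at hw
      cases hw
      subst hwv
      exact pvReach.step hu he hta
    · rw [if_neg hwv] at hw
      exact h1 w b hw
  · -- queue invariant
    intro p hp
    rcases List.mem_append.1 hp with hp' | hp'
    · obtain ⟨b, hb, hble⟩ := h2 p hp'
      rw [hget]
      by_cases hwv : p.2 = v
      · subst hwv
        refine ⟨t, if_pos rfl, ?_⟩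
        rcases hdec with hnone | ⟨bv, hbv, hlt⟩
        · rw [hb] at hnone; cases hnone
        · rw [hb] at hbv; cases hbv; omega
      · exact ⟨b, by rw [if_neg hwv]; exact hb, hble⟩
    · simp only [List.mem_singleton] at hp'
      subst hp'
      exact ⟨t, by rw [hget, if_pos rfl], le_refl t⟩
  · -- source entry
    obtain ⟨b0, hb0, hb0le⟩ := h3
    by_cases hsv : s = v
    · subst hsv
      rcases hdec with hnone | ⟨bv, hbv, hlt⟩
      · rw [hb0] at hnone; cases hnone
      · rw [hb0] at hbv; cases hbv
        exact ⟨t, by rw [hget, if_pos rfl], by omega⟩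
    · exact ⟨b0, by rw [hget, if_neg hsv]; exact hb0, hb0le⟩
  · -- exempted closedness invariant
    intro w b hw
    rw [hget] at hw
    by_cases hwv : w = v
    · rw [if_pos hwv] at hw
      cases hw
      subst hwv
      exact Or.inl (List.mem_append.2 (Or.inr List.mem_cons_self))
    · rw [if_neg hwv] at hw
      rcases h5 w b hw with hq | hcl | hx
      · exact Or.inl (List.mem_append.2 (Or.inl hq))
      · refine Or.inr (Or.inl ?_)
        intro v' t' he' hbt
        obtain ⟨c, hc, hct⟩ := hcl v' t' he' hbt
        rw [hget]
        by_cases hv'v : v' = v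
        · subst hv'v
          refine ⟨t, if_pos rfl, ?_⟩
          rcases hdec with hnone | ⟨bv, hbv, hlt⟩
          · rw [hc] at hnone; cases hnone
          · rw [hc] at hbv; cases hbv; omega
        · exact ⟨c, by rw [if_neg hv'v]; exact hc, hct⟩
      · exact Or.inr (Or.inr hx)

-- the key fold lemma: one relaxation sweep over u0's neighbour list preserves all invariants,
-- only decreases `best`, and leaves every swept neighbour satisfied
theorem pvRelax_fold (D : List (Int × Int × Int)) (s u0 tArr : Int)
    (hu : pvReach D s u0 tArr) :
    ∀ (rem : List (Int × Int)) (best : PySem.Dict Int Int) (q : List (Int × Int)),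
    (∀ p ∈ rem, (u0, p.1, p.2) ∈ D) →
    pvSound D s best → pvIQ best q → pvSrc s best → best.keys.Nodup →
    pvICx D best q u0 tArr →
    pvSound D s (rem.foldl (pvRelaxStep tArr) (best, q)).1 ∧
    pvIQ (rem.foldl (pvRelaxStep tArr) (best, q)).1 (rem.foldl (pvRelaxStep tArr) (best, q)).2 ∧
    pvSrc s (rem.foldl (pvRelaxStep tArr) (best, q)).1 ∧
    (rem.foldl (pvRelaxStep tArr) (best, q)).1.keys.Nodup ∧
    pvICx D (rem.foldl (pvRelaxStep tArr) (best, q)).1 (rem.foldl (pvRelaxStep tArr) (best, q)).2 u0 tArr ∧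
    pvSat (rem.foldl (pvRelaxStep tArr) (best, q)).1 tArr rem ∧
    pvLe (rem.foldl (pvRelaxStep tArr) (best, q)).1 best := by
  intro rem
  induction rem with
  | nil =>
    intro best q _ h1 h2 h3 h4 h5
    refine ⟨h1, h2, h3, h4, h5, ?_, fun w b hb => ⟨b, hb, le_refl b⟩⟩
    intro p hp
    cases hp
  | cons p ps ih =>
    intro best q hrem h1 h2 h3 h4 h5
    have hrem' : ∀ p' ∈ ps, (u0, p'.1, p'.2) ∈ D :=
      fun p' hp' => hrem p' (List.mem_cons_of_mem _ hp')
    have hpD : (u0, p.1, p.2) ∈ D := hrem p List.mem_cons_self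
    simp only [List.foldl_cons]
    by_cases hta : tArr ≤ p.2
    · cases hgv : best.get? p.1 with
      | none =>
        have hstep : pvRelaxStep tArr (best, q) p = (best.insert p.1 p.2, q ++ [(p.2, p.1)]) := by
          simp [pvRelaxStep, hta, hgv]
        rw [hstep]
        obtain ⟨k1, k2, k3, k4, k5⟩ :=
          pvAUpdate D s u0 tArr hu hpD hta (Or.inl hgv) h1 h2 h3 h4 h5
        obtain ⟨c1, c2, c3, c4, c5, c6, c7⟩ := ih _ _ hrem' k1 k2 k3 k4 k5
        refine ⟨c1, c2, c3, c4, c5, ?_, ?_⟩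
        · intro pp hpp htap
          rcases List.mem_cons.1 hpp with rfl | hpp'
          · obtain ⟨c, hc, hcle⟩ := c7 pp.1 pp.2 (by rw [PySem.Dict.get?_insert, if_pos rfl])
            exact ⟨c, hc, hcle⟩
          · exact c6 pp hpp' htap
        · intro w b hb
          by_cases hwv : w = p.1
          · subst hwv; rw [hb] at hgv; cases hgv
          · obtain ⟨c, hc, hcle⟩ := c7 w b (by rw [PySem.Dict.get?_insert, if_neg hwv]; exact hb)
            exact ⟨c, hc, hcle⟩
      | some bv =>
        by_cases hlt : p.2 < bv
        · have hstep : pvRelaxStep tArr (best, q) p = (best.insert p.1 p.2, q ++ [(p.2, p.1)]) := by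
            simp [pvRelaxStep, hta, hgv, hlt]
          rw [hstep]
          obtain ⟨k1, k2, k3, k4, k5⟩ :=
            pvAUpdate D s u0 tArr hu hpD hta (Or.inr ⟨bv, hgv, hlt⟩) h1 h2 h3 h4 h5
          obtain ⟨c1, c2, c3, c4, c5, c6, c7⟩ := ih _ _ hrem' k1 k2 k3 k4 k5
          refine ⟨c1, c2, c3, c4, c5, ?_, ?_⟩
          · intro pp hpp htap
            rcases List.mem_cons.1 hpp with rfl | hpp'
            · obtain ⟨c, hc, hcle⟩ := c7 pp.1 pp.2 (by rw [PySem.Dict.get?_insert, if_pos rfl])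
              exact ⟨c, hc, hcle⟩
            · exact c6 pp hpp' htap
          · intro w b hb
            by_cases hwv : w = p.1
            · subst hwv
              rw [hb] at hgv
              cases hgv
              obtain ⟨c, hc, hcle⟩ := c7 p.1 p.2 (by rw [PySem.Dict.get?_insert, if_pos rfl])
              exact ⟨c, hc, by omega⟩
            · obtain ⟨c, hc, hcle⟩ := c7 w b (by rw [PySem.Dict.get?_insert, if_neg hwv]; exact hb)
              exact ⟨c, hc, hcle⟩
        · have hstep : pvRelaxStep tArr (best, q) p = (best, q) := by
            simp [pvRelaxStep, hta, hgv, hlt]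
          rw [hstep]
          obtain ⟨c1, c2, c3, c4, c5, c6, c7⟩ := ih _ _ hrem' h1 h2 h3 h4 h5
          refine ⟨c1, c2, c3, c4, c5, ?_, c7⟩
          intro pp hpp htap
          rcases List.mem_cons.1 hpp with rfl | hpp'
          · obtain ⟨c, hc, hcle⟩ := c7 pp.1 bv hgv
            exact ⟨c, hc, by omega⟩
          · exact c6 pp hpp' htap
    · have hstep : pvRelaxStep tArr (best, q) p = (best, q) := by
        simp [pvRelaxStep, hta]
      rw [hstep]
      obtain ⟨c1, c2, c3, c4, c5, c6, c7⟩ := ih _ _ hrem' h1 h2 h3 h4 h5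
      refine ⟨c1, c2, c3, c4, c5, ?_, c7⟩
      intro pp hpp htap
      rcases List.mem_cons.1 hpp with rfl | hpp'
      · exact absurd htap hta
      · exact c6 pp hpp' htap

-- the worklist loop turns the loop invariant into pvGood
theorem pvLoopA_good (D : List (Int × Int × Int)) (s : Int)
    (adj : PySem.Dict Int (List (Int × Int)))
    (hAdj : ∀ u v t, ((v, t) ∈ adj.getD u []) ↔ (u, v, t) ∈ D) :
    ∀ (best : PySem.Dict Int Int) (q : List (Int × Int)),
    pvInvA D s best q → pvGood D s (pvLoopA adj best q) := by
  intro best q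
  induction best, q using pvLoopA.induct (adj := adj) with
  | case1 best q hq =>
    intro hinv
    obtain ⟨h1, h2, h3, h4, h5⟩ := hinv
    rw [pvLoopA.eq_def]
    split
    case h_2 tu rest heq => rw [hq] at heq; cases heq
    have hqnil : q = [] := by
      cases q with
      | nil => rfl
      | cons x xs => simp [pvHeapPop] at hq
    subst hqnil
    refine ⟨h1, ?_, h3, h4⟩
    intro u v t bu he hgu hle
    rcases h5 u bu hgu with hmem | hcl
    · cases hmem
    · exact hcl v t he hle
  | case2 best q tu rest hq hguard ih =>
    intro hinv
    obtain ⟨h1, h2, h3, h4, h5⟩ := hinv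
    rw [pvLoopA.eq_def]
    split
    case h_1 heq => rw [hq] at heq; cases heq
    case h_2 tu' rest' heq =>
    rw [hq] at heq
    injection heq with heq'
    injection heq' with heqa heqb
    subst heqa
    subst heqb
    rw [if_pos hguard]
    apply ih
    have hrest := pvHeapPop_rest hq
    obtain ⟨b', hb', hlt'⟩ : ∃ b', best.get? tu.2 = some b' ∧ b' < tu.1 := by
      cases hg2 : best.get? tu.2 with
      | none => rw [hg2] at hguard; cases hguard
      | some b' =>
        rw [hg2] at hguard
        exact ⟨b', rfl, by simpa using hguard⟩
    refine ⟨h1, ?_, h3, h4, ?_⟩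
    · intro p hp
      exact h2 p (by rw [hrest] at hp; exact pvRemoveFirst_subset hp)
    · intro w b hb
      rcases h5 w b hb with hmem | hcl
      · left
        rw [hrest]
        apply mem_pvRemoveFirst_of_ne hmem
        intro hbw
        have hw2 : w = tu.2 := congrArg Prod.snd hbw
        have hb1 : b = tu.1 := congrArg Prod.fst hbw
        rw [hw2, hb'] at hb
        cases hb
        omega
      · right; exact hcl
  | case3 best q tu rest hq hguard ih =>
    intro hinv
    obtain ⟨h1, h2, h3, h4, h5⟩ := hinv
    rw [pvLoopA.eq_def]
    split
    case h_1 heq => rw [hq] at heq; cases heq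
    case h_2 tu' rest' heq =>
    rw [hq] at heq
    injection heq with heq'
    injection heq' with heqa heqb
    subst heqa
    subst heqb
    rw [if_neg hguard]
    apply ih
    have hrest := pvHeapPop_rest hq
    have hm := (pvHeapPop_some hq).1
    obtain ⟨b, hb, hble⟩ := h2 tu hm
    have hbeq : b = tu.1 := by
      have hnlt : ¬ b < tu.1 := by
        intro hlt
        exact hguard (by rw [hb]; simpa using hlt)
      omega
    rw [hbeq] at hb
    have hu : pvReach D s tu.2 tu.1 := h1 tu.2 tu.1 hb
    have hicx : pvICx D best rest tu.2 tu.1 := by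
      intro w bb hw
      rcases h5 w bb hw with hmem | hcl
      · by_cases hbw : (bb, w) = tu
        · right; right
          exact ⟨congrArg Prod.snd hbw, congrArg Prod.fst hbw⟩
        · left
          rw [hrest]
          exact mem_pvRemoveFirst_of_ne hmem hbw
      · right; left; exact hcl
    have hIQrest : pvIQ best rest := by
      intro p hp
      exact h2 p (by rw [hrest] at hp; exact pvRemoveFirst_subset hp)
    obtain ⟨c1, c2, c3, c4, c5, c6, c7⟩ :=
      pvRelax_fold D s tu.2 tu.1 hu (adj.getD tu.2 []) best rest
        (fun p hp => (hAdj tu.2 p.1 p.2).1 hp) h1 hIQrest h3 h4 hicx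
    refine ⟨c1, c2, c3, c4, ?_⟩
    intro w bb hw
    rcases c5 w bb hw with hmem | hcl | ⟨hw2, hb2⟩
    · left; exact hmem
    · right; exact hcl
    · subst hw2
      subst hb2
      right
      intro v t he hbt
      exact c6 (v, t) ((hAdj tu.2 v t).2 he) hbt

-- ---- B side: invariants of the round-based relaxation ----

-- a single decreasing update (shared by both loops) preserves soundness, the source entry and key uniqueness
theorem pvUpdate_inv (D : List (Int × Int × Int)) (s : Int) {best : PySem.Dict Int Int}
    {u v t : Int} (hbu : ∃ bu, best.get? u = some bu ∧ bu ≤ t) (he : (u, v, t) ∈ D)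
    (hdec : best.get? v = none ∨ ∃ bv, best.get? v = some bv ∧ t < bv)
    (h1 : pvSound D s best) (h2 : pvSrc s best) (h3 : best.keys.Nodup) :
    pvSound D s (best.insert v t) ∧ pvSrc s (best.insert v t) ∧ (best.insert v t).keys.Nodup := by
  obtain ⟨bu, hgu, hle⟩ := hbu
  refine ⟨?_, ?_, PySem.Dict.nodup_keys_insert _ _ _ h3⟩
  · intro w b hw
    rw [PySem.Dict.get?_insert] at hw
    by_cases hwv : w = v
    · rw [if_pos hwv] at hw
      cases hw
      subst hwv
      exact pvReach.step (h1 u bu hgu) he hle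
    · rw [if_neg hwv] at hw
      exact h1 w b hw
  · obtain ⟨b0, hb0, hb0le⟩ := h2
    by_cases hsv : s = v
    · subst hsv
      rcases hdec with hnone | ⟨bv, hbv, hlt⟩
      · rw [hb0] at hnone; cases hnone
      · rw [hb0] at hbv
        cases hbv
        exact ⟨t, by rw [PySem.Dict.get?_insert, if_pos rfl], by omega⟩
    · exact ⟨b0, by rw [PySem.Dict.get?_insert, if_neg hsv]; exact hb0, hb0le⟩

theorem pvPassStep_inv (D : List (Int × Int × Int)) (s : Int)
    (st : PySem.Dict Int Int × Bool) (d : Int × Int × Int) (hd : d ∈ D)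
    (h1 : pvSound D s st.1) (h2 : pvSrc s st.1) (h3 : st.1.keys.Nodup) :
    pvSound D s (pvPassStep st d).1 ∧ pvSrc s (pvPassStep st d).1 ∧
      (pvPassStep st d).1.keys.Nodup := by
  cases hgu : st.1.get? d.1 with
  | none => simp only [pvPassStep, hgu]; exact ⟨h1, h2, h3⟩
  | some bu =>
    by_cases hle : bu ≤ d.2.2
    · cases hgv : st.1.get? d.2.1 with
      | none =>
        simp only [pvPassStep, hgu, hgv, if_pos hle]
        exact pvUpdate_inv D s ⟨bu, hgu, hle⟩ hd (Or.inl hgv) h1 h2 h3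
      | some bv =>
        by_cases hlt : d.2.2 < bv
        · simp only [pvPassStep, hgu, hgv, if_pos hle, if_pos hlt]
          exact pvUpdate_inv D s ⟨bu, hgu, hle⟩ hd (Or.inr ⟨bv, hgv, hlt⟩) h1 h2 h3
        · simp only [pvPassStep, hgu, hgv, if_pos hle, if_neg hlt]
          exact ⟨h1, h2, h3⟩
    · simp only [pvPassStep, hgu, if_neg hle]
      exact ⟨h1, h2, h3⟩

theorem pvPass_inv (D : List (Int × Int × Int)) (s : Int) :
    ∀ (l : List (Int × Int × Int)) (st : PySem.Dict Int Int × Bool),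
    (∀ d ∈ l, d ∈ D) →
    pvSound D s st.1 → pvSrc s st.1 → st.1.keys.Nodup →
    pvSound D s (l.foldl pvPassStep st).1 ∧ pvSrc s (l.foldl pvPassStep st).1 ∧
      (l.foldl pvPassStep st).1.keys.Nodup := by
  intro l
  induction l with
  | nil => intro st _ h1 h2 h3; exact ⟨h1, h2, h3⟩
  | cons d ds ih =>
    intro st hmem h1 h2 h3
    simp only [List.foldl_cons]
    obtain ⟨h1', h2', h3'⟩ := pvPassStep_inv D s st d (hmem d List.mem_cons_self) h1 h2 h3
    exact ih _ (fun e he => hmem e (List.mem_cons_of_mem _ he)) h1' h2' h3'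

theorem pvPass_flag_true : ∀ (l : List (Int × Int × Int)) (st : PySem.Dict Int Int × Bool),
    st.2 = true → (l.foldl pvPassStep st).2 = true := by
  intro l
  induction l with
  | nil => intro st h; simpa using h
  | cons d ds ih =>
    intro st h
    simp only [List.foldl_cons]
    apply ih
    unfold pvPassStep
    cases st.1.get? d.1 with
    | none => exact h
    | some bu =>
      simp only
      split
      · split
        · split
          · rfl
          · exact h
        · rfl
      · exact h

theorem pvPass_nochange (D : List (Int × Int × Int)) :
    ∀ (l : List (Int × Int × Int)) (best : PySem.Dict Int Int),
    (l.foldl pvPassStep (best, false)).2 = false →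
    (l.foldl pvPassStep (best, false)).1 = best ∧
    ∀ d ∈ l, ∀ bu, best.get? d.1 = some bu → bu ≤ d.2.2 →
      ∃ bv, best.get? d.2.1 = some bv ∧ bv ≤ d.2.2 := by
  intro l
  induction l with
  | nil => intro best _; exact ⟨rfl, by simp⟩
  | cons d ds ih =>
    intro best hflag
    simp only [List.foldl_cons] at hflag ⊢
    have hstep : pvPassStep (best, false) d = (best, false) := by
      by_contra hch
      have : (pvPassStep (best, false) d).2 = true := by
        cases hgu : best.get? d.1 with
        | none => exact absurd (by simp [pvPassStep, hgu]) hch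
        | some bu =>
          by_cases hle : bu ≤ d.2.2
          · cases hgv : best.get? d.2.1 with
            | none => simp [pvPassStep, hgu, hgv, hle]
            | some bv =>
              by_cases hlt : d.2.2 < bv
              · simp [pvPassStep, hgu, hgv, hle, hlt]
              · exact absurd (by simp [pvPassStep, hgu, hgv, hle, hlt]) hch
          · exact absurd (by simp [pvPassStep, hgu, hle]) hch
      have h4 := pvPass_flag_true ds (pvPassStep (best, false) d) this
      rw [hflag] at h4
      cases h4
    rw [hstep] at hflag ⊢
    obtain ⟨heq, hcl⟩ := ih best hflag
    refine ⟨heq, ?_⟩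
    intro e he bu hgu hle
    rcases List.mem_cons.1 he with rfl | he'
    · -- the head dart caused no change: derive its closedness
      cases hgv : best.get? e.2.1 with
      | none =>
        exfalso
        have : pvPassStep (best, false) e = (best.insert e.2.1 e.2.2, true) := by
          simp [pvPassStep, hgu, hgv, hle]
        rw [hstep] at this
        have h2 := congrArg Prod.snd this
        simp at h2
      | some bv =>
        by_cases hlt : e.2.2 < bv
        · exfalso
          have : pvPassStep (best, false) e = (best.insert e.2.1 e.2.2, true) := by
            simp [pvPassStep, hgu, hgv, hle, hlt]
          rw [hstep] at this
          have h2 := congrArg Prod.snd this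
          simp at h2
        · refine ⟨bv, rfl, ?_⟩
          omega
    · exact hcl e he' bu hgu hle

theorem pvLoopB_good (L D : List (Int × Int × Int)) (s : Int)
    (hLD : ∀ d, d ∈ L ↔ d ∈ D) :
    ∀ (best : PySem.Dict Int Int),
    pvSound D s best → pvSrc s best → best.keys.Nodup →
    pvGood D s (pvLoopB L best) := by
  intro best
  induction best using pvLoopB.induct (darts := L) with
  | case1 best hflag ih =>
    intro h1 h2 h3
    rw [pvLoopB, dif_pos hflag]
    obtain ⟨h1', h2', h3'⟩ := pvPass_inv D s L (best, false) (fun d hd => (hLD d).1 hd) h1 h2 h3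
    rw [List.foldl_attach] at ih
    exact ih h1' h2' h3'
  | case2 best hflag =>
    intro h1 h2 h3
    rw [pvLoopB, dif_neg hflag]
    have hflag' : (L.foldl pvPassStep (best, false)).2 = false := by
      simpa using hflag
    obtain ⟨heq, hcl⟩ := pvPass_nochange D L best hflag'
    rw [heq]
    refine ⟨h1, ?_, h2, h3⟩
    intro u v t bu he hgu hle
    exact hcl (u, v, t) ((hLD (u, v, t)).2 he) bu hgu hle

-- ---- relating A's adjacency dict to B's dart list ----

theorem pvDarts_eq (edges : List (Int × Int × Int)) :
    pvDarts edges = edges.flatMap (fun e => [(e.1, e.2.1, e.2.2), (e.2.1, e.1, e.2.2)]) := by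
  unfold pvDarts
  rw [PySem.List.foldl_congr_mem edges _
    (fun d e => d ++ [(e.1, e.2.1, e.2.2), (e.2.1, e.1, e.2.2)]) []
    (fun acc x _ => by simp)]
  rw [PySem.List.foldl_append_eq_flatMap]
  simp

theorem pvBuildAdj_aux :
    ∀ (edges : List (Int × Int × Int)) (adj0 : PySem.Dict Int (List (Int × Int))) (u v t : Int),
    ((v, t) ∈ (edges.foldl (fun adj e =>
        let adj1 := adj.insert e.1 (adj.getD e.1 [] ++ [(e.2.1, e.2.2)])
        adj1.insert e.2.1 (adj1.getD e.2.1 [] ++ [(e.1, e.2.2)])) adj0).getD u []) ↔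
      ((v, t) ∈ adj0.getD u [] ∨
        (u, v, t) ∈ edges.flatMap (fun e => [(e.1, e.2.1, e.2.2), (e.2.1, e.1, e.2.2)])) := by
  intro edges
  induction edges with
  | nil => simp
  | cons e es ih =>
    intro adj0 u v t
    simp only [List.foldl_cons, List.flatMap_cons, List.mem_append]
    rw [ih]
    have key : ((v, t) ∈ ((adj0.insert e.1 (adj0.getD e.1 [] ++ [(e.2.1, e.2.2)])).insert e.2.1
          ((adj0.insert e.1 (adj0.getD e.1 [] ++ [(e.2.1, e.2.2)])).getD e.2.1 [] ++ [(e.1, e.2.2)])).getD u []) ↔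
        ((v, t) ∈ adj0.getD u [] ∨
          (u, v, t) ∈ [(e.1, e.2.1, e.2.2), (e.2.1, e.1, e.2.2)]) := by
      obtain ⟨a, b, t0⟩ := e
      simp only [PySem.Dict.getD_insert]
      by_cases hub : u = b
      · subst hub
        by_cases hba : u = a
        · subst hba
          simp [Prod.ext_iff]
        · simp [hba, Prod.ext_iff]
      · by_cases hua : u = a
        · subst hua
          simp [hub, Prod.ext_iff]
        · simp [hub, hua, Prod.ext_iff]
    rw [key]
    simp only [List.mem_cons, List.not_mem_nil, or_false]
    tauto

theorem pvBuildAdj_mem (k : Int) (edges : List (Int × Int × Int)) :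
    ∀ u v t, ((v, t) ∈ (pvBuildAdj k edges).getD u []) ↔ (u, v, t) ∈ pvDarts edges := by
  intro u v t
  unfold pvBuildAdj
  rw [pvBuildAdj_aux edges PySem.Dict.empty u v t, pvDarts_eq]
  simp [PySem.Dict.getD_eq_get?_getD, PySem.Dict.get?_empty]

-- ---- per-source equality and the final assembly ----

theorem pvInit_get? (s w : Int) :
    ((PySem.Dict.empty : PySem.Dict Int Int).insert s (-1)).get? w =
      if w = s then some (-1) else none := by
  rw [PySem.Dict.get?_insert]
  by_cases hws : w = s
  · rw [if_pos hws, if_pos hws]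
  · rw [if_neg hws, if_neg hws, PySem.Dict.get?_empty]

theorem pvInit_sound (D : List (Int × Int × Int)) (s : Int) :
    pvSound D s ((PySem.Dict.empty).insert s (-1)) := by
  intro w b hw
  rw [pvInit_get?] at hw
  by_cases hws : w = s
  · rw [if_pos hws] at hw
    cases hw
    subst hws
    exact pvReach.refl
  · rw [if_neg hws] at hw
    cases hw

theorem pvInit_src (s : Int) : pvSrc s ((PySem.Dict.empty).insert s (-1)) :=
  ⟨-1, by rw [pvInit_get?, if_pos rfl], le_refl _⟩

theorem pvInit_nodup (s : Int) :
    ((PySem.Dict.empty : PySem.Dict Int Int).insert s (-1)).keys.Nodup :=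
  PySem.Dict.nodup_keys_insert _ _ _ PySem.Dict.nodup_keys_empty

theorem pvPerSource (k : Int) (edges : List (Int × Int × Int)) (s : Int) :
    (pvLoopA (pvBuildAdj k edges) ((PySem.Dict.empty).insert s (-1)) [(-1, s)]).size =
    (pvLoopB (PySem.List.sorted (pvDarts edges) (fun d => d.2.2) false)
      ((PySem.Dict.empty).insert s (-1))).size := by
  have hA : pvGood (pvDarts edges) s
      (pvLoopA (pvBuildAdj k edges) ((PySem.Dict.empty).insert s (-1)) [(-1, s)]) := by
    apply pvLoopA_good (pvDarts edges) s _ (pvBuildAdj_mem k edges)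
    refine ⟨pvInit_sound _ s, ?_, pvInit_src s, pvInit_nodup s, ?_⟩
    · intro p hp
      simp only [List.mem_singleton] at hp
      subst hp
      exact ⟨-1, by rw [pvInit_get?, if_pos rfl], le_refl _⟩
    · intro w b hw
      rw [pvInit_get?] at hw
      by_cases hws : w = s
      · rw [if_pos hws] at hw
        cases hw
        subst hws
        exact Or.inl List.mem_cons_self
      · rw [if_neg hws] at hw
        cases hw
  have hB : pvGood (pvDarts edges) s
      (pvLoopB (PySem.List.sorted (pvDarts edges) (fun d => d.2.2) false)
        ((PySem.Dict.empty).insert s (-1))) :=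
    pvLoopB_good _ (pvDarts edges) s
      (fun d => (PySem.List.sorted_perm (pvDarts edges) (fun d => d.2.2) false).mem_iff)
      _ (pvInit_sound _ s) (pvInit_src s) (pvInit_nodup s)
  exact pvGood_size_eq hA hB

-- ===== VERDICT (by name: the statement is the Claim_ definition above) =====
theorem count_reachable_pairs_spec : Claim_equal_count_reachable_pairs := by
  intro k edges _
  show (PySem.List.pyRange 0 (2 * k) 1).foldl
      (fun total s => total +
        ((pvLoopA (pvBuildAdj k edges) ((PySem.Dict.empty).insert s (-1)) [(-1, s)]).size : Int) - 1) 0 =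
    (PySem.List.pyRange 0 (2 * k) 1).foldl
      (fun total s => total +
        ((pvLoopB (PySem.List.sorted (pvDarts edges) (fun d => d.2.2) false)
          ((PySem.Dict.empty).insert s (-1))).size : Int) - 1) 0
  exact PySem.List.foldl_congr_mem _ _ _ _ (fun acc s _ => by rw [pvPerSource k edges s])
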